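-- pv_equiv track=rewrite | github.com/reddatetea/fisha | qingchuanBocTdd02.py | getDic
-- ===== SOURCE A (Python) =====
-- def getDic(lst, dates, detals, notes):
--     dic_num = {}
--     num_detal_note = {}
--     for i in range(len(lst)):
--         num = lst[i]
--         date = dates[i]
--         detal = detals[i]
--         note = notes[i]
--         num_total = lst.count(num)
--         dic_num[num] = num_total
--         if num_total == 1:
--             num_detal_note[num] = [date, detal, note]
--     return dic_num, num_detal_note
-- ===== SOURCE B (Python) =====
-- def getDic(lst, dates, detals, notes):
--     # one pass: group value -> list of its indices
--     index_map = {}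
--     for i, num in enumerate(lst):
--         index_map.setdefault(num, []).append(i)
--     # one pass over the groups
--     dic_num = {}
--     num_detal_note = {}
--     for num, idxs in index_map.items():
--         dic_num[num] = len(idxs)
--         if len(idxs) == 1:
--             j = idxs[0]
--             num_detal_note[num] = [dates[j], detals[j], notes[j]]
--     return dic_num, num_detal_note
-- ===== Notes on version B (the rewrite author's own statement) =====
-- stated objective: faster
-- what changed: B builds a value-to-indices grouping table in one pass and then emits counts and unique-item metadata in a single pass over the groups, replacing A's per-element lst.count rescan (O(n) inside the loop).
import Mathlib
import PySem

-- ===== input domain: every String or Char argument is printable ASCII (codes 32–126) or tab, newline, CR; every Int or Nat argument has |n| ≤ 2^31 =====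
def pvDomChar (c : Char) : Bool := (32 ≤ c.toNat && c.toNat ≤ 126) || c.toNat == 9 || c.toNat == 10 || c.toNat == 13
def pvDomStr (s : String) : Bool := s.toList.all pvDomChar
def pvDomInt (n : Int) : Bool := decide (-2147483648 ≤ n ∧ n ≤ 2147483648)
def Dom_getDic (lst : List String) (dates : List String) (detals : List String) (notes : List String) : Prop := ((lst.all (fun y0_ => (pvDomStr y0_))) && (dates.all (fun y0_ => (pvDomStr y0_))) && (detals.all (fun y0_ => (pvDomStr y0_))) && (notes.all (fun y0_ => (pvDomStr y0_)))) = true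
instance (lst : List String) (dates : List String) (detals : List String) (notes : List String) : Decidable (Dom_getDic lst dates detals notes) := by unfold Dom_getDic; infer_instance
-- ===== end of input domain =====

-- B replaces A's per-element lst.count rescan by a value→indices grouping table built in
-- one pass plus one pass over the groups (objective: faster, O(n·k) → O(n)-ish passes).

-- ===== PORT A =====
def getDic (lst : List String) (dates : List String) (detals : List String) (notes : List String) : (List (String × Int)) × (List (String × List String)) :=
  let st := (PySem.List.pyRange 0 (lst.length : Int) 1).foldl
    (fun (st : PySem.Dict String Int × PySem.Dict String (List String)) i =>
      let num := PySem.List.pyGetD lst i ""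
      let date := PySem.List.pyGetD dates i ""
      let detal := PySem.List.pyGetD detals i ""
      let note := PySem.List.pyGetD notes i ""
      let numTotal : Int := PySem.List.count lst num
      (st.1.insert num numTotal,
       if numTotal == 1 then st.2.insert num [date, detal, note] else st.2))
    (PySem.Dict.empty, PySem.Dict.empty)
  (st.1.items, st.2.items)

-- ===== PORT B =====
def getDic_alt (lst : List String) (dates : List String) (detals : List String) (notes : List String) : (List (String × Int)) × (List (String × List String)) :=
  -- index_map: value → list of its indices, one pass over enumerate(lst)
  let indexMap : PySem.Dict String (List Int) :=
    (PySem.List.enumerate lst 0).foldl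
      (fun d p => d.modify p.2 [] (fun v => v ++ [p.1]))
      PySem.Dict.empty
  -- one pass over the groups
  let st := indexMap.items.foldl
    (fun (st : PySem.Dict String Int × PySem.Dict String (List String)) p =>
      ((st.1.insert p.1 ((p.2.length : Int))),
       if (p.2.length : Int) == 1 then
         let j := PySem.List.pyGetD p.2 0 0
         st.2.insert p.1 [PySem.List.pyGetD dates j "", PySem.List.pyGetD detals j "", PySem.List.pyGetD notes j ""]
       else st.2))
    (PySem.Dict.empty, PySem.Dict.empty)
  (st.1.items, st.2.items)

-- ===== PRECONDITION & SPEC =====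
-- Python A raises IndexError when lst is longer than dates/detals/notes (it reads dates[i], detals[i], notes[i] for every i < len(lst)); exactly those inputs are excluded.
def Pre_getDic (lst : List String) (dates : List String) (detals : List String) (notes : List String) : Prop :=
  lst.length ≤ dates.length ∧ lst.length ≤ detals.length ∧ lst.length ≤ notes.length
instance (lst : List String) (dates : List String) (detals : List String) (notes : List String) : Decidable (Pre_getDic lst dates detals notes) := by unfold Pre_getDic; infer_instance
def pvWitness_getDic : List String × List String × List String × List String :=
  (["a", "b", "a"], ["d1", "d2", "d3"], ["x", "y", "z"], ["n1", "n2", "n3"])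

def Spec_getDic (lst : List String) (dates : List String) (detals : List String) (notes : List String) (out : (List (String × Int)) × (List (String × List String))) : Prop := out = getDic_alt lst dates detals notes
instance (lst : List String) (dates : List String) (detals : List String) (notes : List String) (out : (List (String × Int)) × (List (String × List String))) : Decidable (Spec_getDic lst dates detals notes out) := by unfold Spec_getDic; infer_instance

-- ===== CLAIM (what is proved, stated in full; the proofs are below) =====
def Claim_equal_getDic : Prop := ∀ (lst : List String) (dates : List String) (detals : List String) (notes : List String), Dom_getDic lst dates detals notes → Pre_getDic lst dates detals notes → Spec_getDic lst dates detals notes (getDic lst dates detals notes)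

-- ===== LEMMAS AND PROOFS =====

-- proof-only helpers
def pvTrip (dates detals notes : List String) (j : Int) : List String :=
  [PySem.List.pyGetD dates j "", PySem.List.pyGetD detals j "", PySem.List.pyGetD notes j ""]

def pvIdxs (lst : List String) (x : String) : List Int :=
  ((PySem.List.enumerate lst 0).filter (fun p => p.2 == x)).map (fun p => p.1)

def pvGrp (lst : List String) : PySem.Dict String (List Int) :=
  (PySem.List.enumerate lst 0).foldl (fun d p => d.modify p.2 [] (fun v => v ++ [p.1])) PySem.Dict.empty

-- a fold inserting, at key k a, a value that depends only on the key: lookup characterization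
theorem pv_getD_foldl_insert_keyfun {kk nu bb : Type} [BEq kk] [LawfulBEq kk] [DecidableEq kk]
    (l : List bb) (k : bb -> kk) (C : kk -> nu) (x : kk) (dflt : nu) :
    ∀ (d : PySem.Dict kk nu),
      (l.foldl (fun d a => d.insert (k a) (C (k a))) d).getD x dflt
        = if x ∈ l.map k then C x else d.getD x dflt := by
  induction l with
  | nil => intro d; simp
  | cons a l ih =>
    intro d
    simp only [List.foldl_cons, ih, List.map_cons, List.mem_cons]
    by_cases hx : x ∈ l.map k
    · simp [hx]
    · by_cases he : x = k a
      · simp [hx, he, PySem.Dict.getD_insert]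
      · simp [hx, he, PySem.Dict.getD_insert]

-- a fold conditionally inserting at fresh, pairwise-distinct keys appends the selected pairs
theorem pv_items_foldl_insert_if_fresh {kk nu bb : Type} [BEq kk] [LawfulBEq kk]
    (l : List bb) (kf : bb -> kk) (v : bb -> nu) (c : bb -> Bool) :
    ∀ (d : PySem.Dict kk nu),
      (∀ a ∈ l.filter c, d.contains (kf a) = false) ->
      ((l.filter c).map kf).Nodup ->
      (l.foldl (fun d a => if c a then d.insert (kf a) (v a) else d) d).items
        = d.items ++ (l.filter c).map (fun a => (kf a, v a)) := by
  induction l with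
  | nil => intro d _ _; simp
  | cons a l ih =>
    intro d hfresh hnd
    by_cases hca : c a = true
    · have hfa : d.contains (kf a) = false := hfresh a (by simp [hca])
      have hnd2 : (kf a :: (l.filter c).map kf).Nodup := by
        simpa [hca] using hnd
      have hnd' : ((l.filter c).map kf).Nodup := (List.nodup_cons.mp hnd2).2
      have hnotmem : kf a ∉ (l.filter c).map kf := (List.nodup_cons.mp hnd2).1
      have hfresh' : ∀ b ∈ l.filter c, (d.insert (kf a) (v a)).contains (kf b) = false := by
        intro b hb
        rw [PySem.Dict.contains_insert]
        have h1 : (kf b == kf a) = false := by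
          simp only [beq_eq_false_iff_ne]
          intro h
          exact hnotmem (h ▸ List.mem_map_of_mem hb)
        have hbmem : b ∈ (a :: l).filter c := by
          rw [List.filter_cons]; simp only [hca, if_true]; exact List.mem_cons_of_mem _ hb
        have h2 := hfresh b hbmem
        simp [h1, h2]
      simp only [List.foldl_cons, hca, if_true]
      rw [ih _ hfresh' hnd', PySem.Dict.items_insert_of_not_contains _ _ hfa]
      simp [hca]
    · have hca' : c a = false := by simpa using hca
      have hflt : (a :: l).filter c = l.filter c := by simp [hca']
      simp only [List.foldl_cons, hca', if_false, Bool.false_eq_true]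
      rw [ih d (by rw [← hflt]; exact hfresh) (by rw [← hflt]; exact hnd), hflt]

-- number of enumerate entries carrying value x = count of x
theorem pv_length_filter_enum (l : List String) (x : String) :
    ∀ (s : Int), ((PySem.List.enumerate l s).filter (fun p => p.2 == x)).length = l.count x := by
  induction l with
  | nil => intro s; simp [PySem.List.enumerate_nil]
  | cons y t ih =>
    intro s
    rw [PySem.List.enumerate_cons]
    by_cases h : (y == x) = true
    · simp [h, ih, List.count_cons]
    · simp [h, ih, List.count_cons]

-- the CORE order lemma: entries of enumerate whose value satisfies u (a predicate true only on
-- values occurring at most once) are exactly the u-values in first-occurrence order, paired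
-- with their unique index
theorem pv_enum_filter_unique (l : List String) (u : String -> Bool)
    (hu : ∀ x, u x = true -> l.count x ≤ 1) :
    ∀ (s : Int),
      (PySem.List.enumerate l s).filter (fun p => u p.2)
        = ((PySem.Set.ofList l).filter u).map (fun x => (s + (l.idxOf x : Int), x)) := by
  induction l with
  | nil => intro s; simp [PySem.List.enumerate_nil, PySem.Set.ofList_nil]
  | cons y t ih =>
    intro s
    have hu' : ∀ x, u x = true -> t.count x ≤ 1 := by
      intro x hx
      have := hu x hx
      rw [List.count_cons] at this
      omega
    rw [PySem.List.enumerate_cons, PySem.Set.ofList_cons]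
    by_cases hy : u y = true
    · have hyt : y ∉ t := by
        intro hmem
        have h1 := hu y hy
        have h2 : 0 < t.count y := List.count_pos_iff.mpr hmem
        rw [List.count_cons] at h1
        simp at h1
        omega
      have hdisc : (PySem.Set.ofList t).discard y = PySem.Set.ofList t := by
        unfold PySem.Set.discard
        apply List.filter_eq_self.mpr
        intro a ha
        have ha' : a ∈ t := (PySem.Set.mem_ofList t a).mp ha
        have : a ≠ y := fun h => hyt (h ▸ ha')
        simp [this]
      rw [hdisc]
      simp only [List.filter_cons, hy, if_true]
      rw [ih hu' (s + 1)]
      simp only [List.map_cons, List.idxOf_cons_self]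
      congr 1
      · simp
      · apply List.map_congr_left
        intro x hx
        have hxt : x ∈ t := (PySem.Set.mem_ofList t x).mp (List.mem_filter.mp hx).1
        have hxy : (y == x) = false := by
          simp only [beq_eq_false_iff_ne]
          intro h; exact hyt (h ▸ hxt)
        rw [List.idxOf_cons, hxy]
        simp only [cond_false]
        push_cast
        ring_nf
    · have hyf : u y = false := by simpa using hy
      simp only [List.filter_cons, hyf, Bool.false_eq_true, if_false]
      rw [ih hu' (s + 1)]
      have hflt : List.filter u ((PySem.Set.ofList t).discard y) = List.filter u (PySem.Set.ofList t) := by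
        unfold PySem.Set.discard
        rw [List.filter_filter]
        apply List.filter_congr
        intro a _
        by_cases hua : u a = true
        · have : (a == y) = false := by
            simp only [beq_eq_false_iff_ne]
            intro h; rw [h] at hua; simp [hua] at hyf
          simp [hua, this]
        · simp [Bool.eq_false_iff.mpr hua]
      rw [hflt]
      apply List.map_congr_left
      intro x hx
      have hux : u x = true := (List.mem_filter.mp hx).2
      have hxy : (y == x) = false := by
        simp only [beq_eq_false_iff_ne]
        intro h; rw [← h] at hux; rw [hux] at hyf; exact absurd hyf (by simp)
      rw [List.idxOf_cons, hxy]
      simp only [cond_false]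
      push_cast
      ring_nf

theorem pv_beq_cast (n : Nat) : ((n : Int) == 1) = (n == 1) := by
  by_cases h : n = 1
  · subst h; simp
  · have h1 : (n == 1) = false := by simp [h]
    have h2 : ((n : Int) == 1) = false := by
      simp only [beq_eq_false_iff_ne]
      intro hc; apply h; omega
    rw [h1, h2]

theorem pv_pyGetD_singleton (j : Int) : PySem.List.pyGetD [j] 0 0 = j := by
  simp [PySem.List.pyGetD, PySem.List.pyGet?, PySem.List.pyIdx?]

theorem pv_grp_keys (lst : List String) : (pvGrp lst).keys = PySem.Set.ofList lst := by
  unfold pvGrp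
  have h := PySem.Dict.keys_foldl_modify_key (l := PySem.List.enumerate lst 0)
      (key := fun p : Int × String => p.2) (d0 := ([] : List Int))
      (f := fun _ p => (fun v => v ++ [p.1])) PySem.Dict.empty
  simpa [PySem.List.map_snd_enumerate] using h

theorem pv_grp_nodup (lst : List String) : (pvGrp lst).keys.Nodup := by
  rw [pv_grp_keys]; exact PySem.Set.nodup_ofList lst

theorem pv_grp_getD (lst : List String) (x : String) :
    (pvGrp lst).getD x [] = pvIdxs lst x := by
  unfold pvGrp pvIdxs
  rw [show (PySem.List.enumerate lst 0).foldl (fun d p => d.modify p.2 [] (fun v => v ++ [p.1])) PySem.Dict.empty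
       = ((PySem.List.enumerate lst 0).map (fun p => (p.2, p.1))).foldl
           (fun d p => d.modify p.1 [] (fun v => v ++ [p.2])) PySem.Dict.empty from by
         rw [List.foldl_map]]
  rw [PySem.Dict.getD_foldl_modify_append]
  rw [List.filter_map, List.map_map]
  simp only [PySem.Dict.getD_empty]
  rfl

theorem pv_grp_items (lst : List String) :
    (pvGrp lst).items = (PySem.Set.ofList lst).map (fun x => (x, pvIdxs lst x)) := by
  rw [PySem.Dict.items_eq_map_keys _ (pv_grp_nodup lst) ([] : List Int), pv_grp_keys]
  apply List.map_congr_left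
  intro x _
  rw [pv_grp_getD]

theorem pv_len_idxs (lst : List String) (x : String) : (pvIdxs lst x).length = lst.count x := by
  unfold pvIdxs; rw [List.length_map]; exact pv_length_filter_enum lst x 0

theorem pv_idxs_count_one (lst : List String) (x : String) (h : lst.count x = 1) :
    pvIdxs lst x = [(lst.idxOf x : Int)] := by
  unfold pvIdxs
  have hu : ∀ z, (z == x) = true → lst.count z ≤ 1 := by
    intro z hz; rw [beq_iff_eq] at hz; subst hz; omega
  rw [pv_enum_filter_unique lst (fun z => z == x) hu 0]
  have hx : x ∈ PySem.Set.ofList lst :=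
    (PySem.Set.mem_ofList lst x).mpr (List.count_pos_iff.mp (by omega))
  have hcnt : (PySem.Set.ofList lst).count x = 1 := by
    have hle := List.nodup_iff_count_le_one.mp (PySem.Set.nodup_ofList lst) x
    have hpos := List.count_pos_iff.mpr hx
    omega
  rw [List.filter_beq, hcnt]
  simp

theorem pv_main (lst dates detals notes : List String) :
    getDic lst dates detals notes = getDic_alt lst dates detals notes := by
  -- step bodies, named
  have henum : (PySem.List.pyRange 0 (lst.length : Int) 1).map
      (fun j => (j, PySem.List.pyGetD lst j "")) = PySem.List.enumerate lst 0 := by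
    simpa using (PySem.List.enumerate_eq_map_pyRange lst "").symm
  -- A's loop rewritten as a loop over enumerate(lst)
  have hAfold :
      (PySem.List.pyRange 0 (lst.length : Int) 1).foldl
        (fun (st : PySem.Dict String Int × PySem.Dict String (List String)) i =>
          (st.1.insert (PySem.List.pyGetD lst i "") ((PySem.List.count lst (PySem.List.pyGetD lst i "") : Int)),
           if ((PySem.List.count lst (PySem.List.pyGetD lst i "") : Int) == 1) = true then
             st.2.insert (PySem.List.pyGetD lst i "")
               [PySem.List.pyGetD dates i "", PySem.List.pyGetD detals i "", PySem.List.pyGetD notes i ""]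
           else st.2))
        (PySem.Dict.empty, PySem.Dict.empty)
      = (PySem.List.enumerate lst 0).foldl
        (fun (st : PySem.Dict String Int × PySem.Dict String (List String)) p =>
          (st.1.insert p.2 ((PySem.List.count lst p.2 : Int)),
           if ((PySem.List.count lst p.2 : Int) == 1) = true then
             st.2.insert p.2
               [PySem.List.pyGetD dates p.1 "", PySem.List.pyGetD detals p.1 "", PySem.List.pyGetD notes p.1 ""]
           else st.2))
        (PySem.Dict.empty, PySem.Dict.empty) := by
    rw [← henum, List.foldl_map]
  -- split the two independent accumulators, A side
  have hsplitA :
      (PySem.List.enumerate lst 0).foldl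
        (fun (st : PySem.Dict String Int × PySem.Dict String (List String)) p =>
          (st.1.insert p.2 ((PySem.List.count lst p.2 : Int)),
           if ((PySem.List.count lst p.2 : Int) == 1) = true then
             st.2.insert p.2
               [PySem.List.pyGetD dates p.1 "", PySem.List.pyGetD detals p.1 "", PySem.List.pyGetD notes p.1 ""]
           else st.2))
        (PySem.Dict.empty, PySem.Dict.empty)
      = ((PySem.List.enumerate lst 0).foldl
           (fun (d : PySem.Dict String Int) (p : Int × String) =>
             d.insert p.2 ((PySem.List.count lst p.2 : Int))) PySem.Dict.empty,
         (PySem.List.enumerate lst 0).foldl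
           (fun (d : PySem.Dict String (List String)) (p : Int × String) =>
             if ((PySem.List.count lst p.2 : Int) == 1) = true then
               d.insert p.2
                 [PySem.List.pyGetD dates p.1 "", PySem.List.pyGetD detals p.1 "", PySem.List.pyGetD notes p.1 ""]
             else d) PySem.Dict.empty) :=
    PySem.List.foldl_prod_mk
      (fun (d : PySem.Dict String Int) (p : Int × String) =>
        d.insert p.2 ((PySem.List.count lst p.2 : Int)))
      (fun (d : PySem.Dict String (List String)) (p : Int × String) =>
        if ((PySem.List.count lst p.2 : Int) == 1) = true then
          d.insert p.2
            [PySem.List.pyGetD dates p.1 "", PySem.List.pyGetD detals p.1 "", PySem.List.pyGetD notes p.1 ""]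
        else d)
      (PySem.List.enumerate lst 0) PySem.Dict.empty PySem.Dict.empty
  -- split the two independent accumulators, B side
  have hsplitB :
      (pvGrp lst).items.foldl
        (fun (st : PySem.Dict String Int × PySem.Dict String (List String)) p =>
          (st.1.insert p.1 ((p.2.length : Int)),
           if ((p.2.length : Int) == 1) = true then
             st.2.insert p.1
               [PySem.List.pyGetD dates (PySem.List.pyGetD p.2 0 0) "",
                PySem.List.pyGetD detals (PySem.List.pyGetD p.2 0 0) "",
                PySem.List.pyGetD notes (PySem.List.pyGetD p.2 0 0) ""]
           else st.2))
        (PySem.Dict.empty, PySem.Dict.empty)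
      = ((pvGrp lst).items.foldl
           (fun (d : PySem.Dict String Int) (p : String × List Int) =>
             d.insert p.1 ((p.2.length : Int))) PySem.Dict.empty,
         (pvGrp lst).items.foldl
           (fun (d : PySem.Dict String (List String)) (p : String × List Int) =>
             if ((p.2.length : Int) == 1) = true then
               d.insert p.1
                 [PySem.List.pyGetD dates (PySem.List.pyGetD p.2 0 0) "",
                  PySem.List.pyGetD detals (PySem.List.pyGetD p.2 0 0) "",
                  PySem.List.pyGetD notes (PySem.List.pyGetD p.2 0 0) ""]
             else d) PySem.Dict.empty) :=
    PySem.List.foldl_prod_mk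
      (fun (d : PySem.Dict String Int) (p : String × List Int) =>
        d.insert p.1 ((p.2.length : Int)))
      (fun (d : PySem.Dict String (List String)) (p : String × List Int) =>
        if ((p.2.length : Int) == 1) = true then
          d.insert p.1
            [PySem.List.pyGetD dates (PySem.List.pyGetD p.2 0 0) "",
             PySem.List.pyGetD detals (PySem.List.pyGetD p.2 0 0) "",
             PySem.List.pyGetD notes (PySem.List.pyGetD p.2 0 0) ""]
        else d)
      (pvGrp lst).items PySem.Dict.empty PySem.Dict.empty
  -- characterize the four single-accumulator loops
  have hA1 : ((PySem.List.enumerate lst 0).foldl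
        (fun (d : PySem.Dict String Int) (p : Int × String) =>
          d.insert p.2 ((PySem.List.count lst p.2 : Int))) PySem.Dict.empty).items
      = (PySem.Set.ofList lst).map (fun x => (x, (PySem.List.count lst x : Int))) := by
    have hnd : ((PySem.List.enumerate lst 0).foldl
        (fun (d : PySem.Dict String Int) (p : Int × String) =>
          d.insert p.2 ((PySem.List.count lst p.2 : Int))) PySem.Dict.empty).keys.Nodup :=
      PySem.Dict.nodup_keys_foldl_insert_key (PySem.List.enumerate lst 0)
        (fun p : Int × String => p.2) (fun _ p => ((PySem.List.count lst p.2 : Int)))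
        PySem.Dict.empty (by simp)
    have hkeys : ((PySem.List.enumerate lst 0).foldl
        (fun (d : PySem.Dict String Int) (p : Int × String) =>
          d.insert p.2 ((PySem.List.count lst p.2 : Int))) PySem.Dict.empty).keys
        = PySem.Set.update PySem.Dict.empty.keys ((PySem.List.enumerate lst 0).map (fun p : Int × String => p.2)) :=
      PySem.Dict.keys_foldl_insert_key (PySem.List.enumerate lst 0)
        (fun p : Int × String => p.2) (fun _ p => ((PySem.List.count lst p.2 : Int))) PySem.Dict.empty
    rw [PySem.List.map_snd_enumerate] at hkeys
    rw [PySem.Dict.items_eq_map_keys _ hnd (0 : Int), hkeys]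
    have hkeys' : PySem.Set.update (PySem.Dict.empty : PySem.Dict String Int).keys lst = PySem.Set.ofList lst := by
      simp [PySem.Set.update_nil_left]
    rw [hkeys']
    apply List.map_congr_left
    intro x hx
    have hx' : x ∈ lst := (PySem.Set.mem_ofList lst x).mp hx
    have hmem : x ∈ (PySem.List.enumerate lst 0).map (fun p : Int × String => p.2) := by
      rw [PySem.List.map_snd_enumerate]; exact hx'
    have hg : ((PySem.List.enumerate lst 0).foldl
        (fun (d : PySem.Dict String Int) (p : Int × String) =>
          d.insert p.2 ((PySem.List.count lst p.2 : Int))) PySem.Dict.empty).getD x 0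
        = if x ∈ (PySem.List.enumerate lst 0).map (fun p : Int × String => p.2)
            then ((PySem.List.count lst x : Int)) else PySem.Dict.empty.getD x 0 :=
      pv_getD_foldl_insert_keyfun (PySem.List.enumerate lst 0) (fun p : Int × String => p.2)
        (fun z => ((PySem.List.count lst z : Int))) x 0 PySem.Dict.empty
    rw [hg, if_pos hmem]
  have hB1 : ((pvGrp lst).items.foldl
        (fun (d : PySem.Dict String Int) (p : String × List Int) =>
          d.insert p.1 ((p.2.length : Int))) PySem.Dict.empty).items
      = (pvGrp lst).items.map (fun p => (p.1, (p.2.length : Int))) := by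
    have h : ((pvGrp lst).items.foldl
        (fun (d : PySem.Dict String Int) (p : String × List Int) =>
          d.insert p.1 ((p.2.length : Int))) PySem.Dict.empty).items
        = PySem.Dict.empty.items ++ (pvGrp lst).items.map (fun p => (p.1, (p.2.length : Int))) :=
      PySem.Dict.items_foldl_insert_fresh (pvGrp lst).items (fun p => p.1)
        (fun p => ((p.2.length : Int))) PySem.Dict.empty
        (by intro a _; simp)
        (by simpa [PySem.Dict.keys] using pv_grp_nodup lst)
    simpa using h
  -- the unique-count predicate
  have hcnt_le : ∀ z : String, ((PySem.List.count lst z : Int) == 1) = true → lst.count z ≤ 1 := by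
    intro z h
    rw [PySem.List.count_eq, pv_beq_cast, beq_iff_eq] at h
    omega
  have hfe := pv_enum_filter_unique lst (fun z => ((PySem.List.count lst z : Int) == 1)) hcnt_le 0
  have hA2 : ((PySem.List.enumerate lst 0).foldl
        (fun (d : PySem.Dict String (List String)) (p : Int × String) =>
          if ((PySem.List.count lst p.2 : Int) == 1) = true then
            d.insert p.2
              [PySem.List.pyGetD dates p.1 "", PySem.List.pyGetD detals p.1 "", PySem.List.pyGetD notes p.1 ""]
          else d) PySem.Dict.empty).items
      = ((PySem.Set.ofList lst).filter (fun z => ((PySem.List.count lst z : Int) == 1))).map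
          (fun x => (x, [PySem.List.pyGetD dates ((0 : Int) + (lst.idxOf x : Int)) "",
                         PySem.List.pyGetD detals ((0 : Int) + (lst.idxOf x : Int)) "",
                         PySem.List.pyGetD notes ((0 : Int) + (lst.idxOf x : Int)) ""])) := by
    have hndA : (((PySem.List.enumerate lst 0).filter
        (fun p : Int × String => ((PySem.List.count lst p.2 : Int) == 1))).map (fun p : Int × String => p.2)).Nodup := by
      rw [hfe, List.map_map]
      have hid : ((fun p : Int × String => p.2) ∘ (fun x => (((0 : Int) + (lst.idxOf x : Int)), x)))
          = fun x : String => x := by funext z; rfl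
      rw [hid, List.map_id']
      exact List.Nodup.filter _ (PySem.Set.nodup_ofList lst)
    have h : ((PySem.List.enumerate lst 0).foldl
        (fun (d : PySem.Dict String (List String)) (p : Int × String) =>
          if ((PySem.List.count lst p.2 : Int) == 1) = true then
            d.insert p.2
              [PySem.List.pyGetD dates p.1 "", PySem.List.pyGetD detals p.1 "", PySem.List.pyGetD notes p.1 ""]
          else d) PySem.Dict.empty).items
        = PySem.Dict.empty.items ++ ((PySem.List.enumerate lst 0).filter
            (fun p : Int × String => ((PySem.List.count lst p.2 : Int) == 1))).map
            (fun p => (p.2, [PySem.List.pyGetD dates p.1 "", PySem.List.pyGetD detals p.1 "", PySem.List.pyGetD notes p.1 ""])) :=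
      pv_items_foldl_insert_if_fresh (PySem.List.enumerate lst 0) (fun p : Int × String => p.2)
        (fun p => [PySem.List.pyGetD dates p.1 "", PySem.List.pyGetD detals p.1 "", PySem.List.pyGetD notes p.1 ""])
        (fun p : Int × String => ((PySem.List.count lst p.2 : Int) == 1))
        PySem.Dict.empty (by intro a _; simp) hndA
    rw [h, hfe, List.map_map]
    rfl
  have hB2 : ((pvGrp lst).items.foldl
        (fun (d : PySem.Dict String (List String)) (p : String × List Int) =>
          if ((p.2.length : Int) == 1) = true then
            d.insert p.1
              [PySem.List.pyGetD dates (PySem.List.pyGetD p.2 0 0) "",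
               PySem.List.pyGetD detals (PySem.List.pyGetD p.2 0 0) "",
               PySem.List.pyGetD notes (PySem.List.pyGetD p.2 0 0) ""]
          else d) PySem.Dict.empty).items
      = ((pvGrp lst).items.filter (fun p : String × List Int => ((p.2.length : Int) == 1))).map
          (fun p => (p.1, [PySem.List.pyGetD dates (PySem.List.pyGetD p.2 0 0) "",
                           PySem.List.pyGetD detals (PySem.List.pyGetD p.2 0 0) "",
                           PySem.List.pyGetD notes (PySem.List.pyGetD p.2 0 0) ""])) := by
    have hkeysnd : ((pvGrp lst).items.map (fun p : String × List Int => p.1)).Nodup := by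
      simpa [PySem.Dict.keys] using pv_grp_nodup lst
    have hndB : (((pvGrp lst).items.filter
        (fun p : String × List Int => ((p.2.length : Int) == 1))).map (fun p : String × List Int => p.1)).Nodup :=
      hkeysnd.sublist (List.Sublist.map _ List.filter_sublist)
    have h := pv_items_foldl_insert_if_fresh (pvGrp lst).items (fun p : String × List Int => p.1)
        (fun p => [PySem.List.pyGetD dates (PySem.List.pyGetD p.2 0 0) "",
                   PySem.List.pyGetD detals (PySem.List.pyGetD p.2 0 0) "",
                   PySem.List.pyGetD notes (PySem.List.pyGetD p.2 0 0) ""])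
        (fun p : String × List Int => ((p.2.length : Int) == 1))
        PySem.Dict.empty (by intro a _; simp) hndB
    simpa using h
  -- assemble
  have hone : ∀ x : String, ((PySem.List.count lst x : Int) == 1) = (((pvIdxs lst x).length : Int) == 1) := by
    intro x
    rw [PySem.List.count_eq, pv_len_idxs]
  have hfilter : (pvGrp lst).items.filter (fun p : String × List Int => ((p.2.length : Int) == 1))
      = ((PySem.Set.ofList lst).filter (fun z => ((PySem.List.count lst z : Int) == 1))).map
          (fun x => (x, pvIdxs lst x)) := by
    rw [pv_grp_items, List.filter_map]
    congr 1
    apply List.filter_congr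
    intro x _
    simp only [Function.comp]
    exact (hone x).symm
  have hpair2 : ((PySem.Set.ofList lst).filter (fun z => ((PySem.List.count lst z : Int) == 1))).map
        ((fun p : String × List Int => (p.1, [PySem.List.pyGetD dates (PySem.List.pyGetD p.2 0 0) "",
                           PySem.List.pyGetD detals (PySem.List.pyGetD p.2 0 0) "",
                           PySem.List.pyGetD notes (PySem.List.pyGetD p.2 0 0) ""])) ∘ (fun x => (x, pvIdxs lst x)))
      = ((PySem.Set.ofList lst).filter (fun z => ((PySem.List.count lst z : Int) == 1))).map
          (fun x => (x, [PySem.List.pyGetD dates ((0 : Int) + (lst.idxOf x : Int)) "",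
                         PySem.List.pyGetD detals ((0 : Int) + (lst.idxOf x : Int)) "",
                         PySem.List.pyGetD notes ((0 : Int) + (lst.idxOf x : Int)) ""])) := by
    apply List.map_congr_left
    intro x hx
    have hux := (List.mem_filter.mp hx).2
    have hc1 : lst.count x = 1 := by
      rw [PySem.List.count_eq, pv_beq_cast, beq_iff_eq] at hux
      exact hux
    have hidxs := pv_idxs_count_one lst x hc1
    simp only [Function.comp]
    rw [hidxs, pv_pyGetD_singleton]
    simp
  -- final computation
  show ((PySem.List.pyRange 0 (lst.length : Int) 1).foldl
        (fun (st : PySem.Dict String Int × PySem.Dict String (List String)) i =>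
          (st.1.insert (PySem.List.pyGetD lst i "") ((PySem.List.count lst (PySem.List.pyGetD lst i "") : Int)),
           if ((PySem.List.count lst (PySem.List.pyGetD lst i "") : Int) == 1) = true then
             st.2.insert (PySem.List.pyGetD lst i "")
               [PySem.List.pyGetD dates i "", PySem.List.pyGetD detals i "", PySem.List.pyGetD notes i ""]
           else st.2))
        (PySem.Dict.empty, PySem.Dict.empty) |>.1.items,
        (PySem.List.pyRange 0 (lst.length : Int) 1).foldl
        (fun (st : PySem.Dict String Int × PySem.Dict String (List String)) i =>
          (st.1.insert (PySem.List.pyGetD lst i "") ((PySem.List.count lst (PySem.List.pyGetD lst i "") : Int)),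
           if ((PySem.List.count lst (PySem.List.pyGetD lst i "") : Int) == 1) = true then
             st.2.insert (PySem.List.pyGetD lst i "")
               [PySem.List.pyGetD dates i "", PySem.List.pyGetD detals i "", PySem.List.pyGetD notes i ""]
           else st.2))
        (PySem.Dict.empty, PySem.Dict.empty) |>.2.items)
      = ((pvGrp lst).items.foldl
        (fun (st : PySem.Dict String Int × PySem.Dict String (List String)) p =>
          (st.1.insert p.1 ((p.2.length : Int)),
           if ((p.2.length : Int) == 1) = true then
             st.2.insert p.1
               [PySem.List.pyGetD dates (PySem.List.pyGetD p.2 0 0) "",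
                PySem.List.pyGetD detals (PySem.List.pyGetD p.2 0 0) "",
                PySem.List.pyGetD notes (PySem.List.pyGetD p.2 0 0) ""]
           else st.2))
        (PySem.Dict.empty, PySem.Dict.empty) |>.1.items,
        (pvGrp lst).items.foldl
        (fun (st : PySem.Dict String Int × PySem.Dict String (List String)) p =>
          (st.1.insert p.1 ((p.2.length : Int)),
           if ((p.2.length : Int) == 1) = true then
             st.2.insert p.1
               [PySem.List.pyGetD dates (PySem.List.pyGetD p.2 0 0) "",
                PySem.List.pyGetD detals (PySem.List.pyGetD p.2 0 0) "",
                PySem.List.pyGetD notes (PySem.List.pyGetD p.2 0 0) ""]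
           else st.2))
        (PySem.Dict.empty, PySem.Dict.empty) |>.2.items)
  rw [hAfold, hsplitA, hsplitB]
  refine Prod.ext ?_ ?_
  · show ((PySem.List.enumerate lst 0).foldl
        (fun (d : PySem.Dict String Int) (p : Int × String) =>
          d.insert p.2 ((PySem.List.count lst p.2 : Int))) PySem.Dict.empty).items
      = ((pvGrp lst).items.foldl
        (fun (d : PySem.Dict String Int) (p : String × List Int) =>
          d.insert p.1 ((p.2.length : Int))) PySem.Dict.empty).items
    rw [hA1, hB1, pv_grp_items, List.map_map]
    apply List.map_congr_left
    intro x _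
    simp only [Function.comp]
    rw [PySem.List.count_eq, pv_len_idxs]
  · show ((PySem.List.enumerate lst 0).foldl
        (fun (d : PySem.Dict String (List String)) (p : Int × String) =>
          if ((PySem.List.count lst p.2 : Int) == 1) = true then
            d.insert p.2
              [PySem.List.pyGetD dates p.1 "", PySem.List.pyGetD detals p.1 "", PySem.List.pyGetD notes p.1 ""]
          else d) PySem.Dict.empty).items
      = ((pvGrp lst).items.foldl
        (fun (d : PySem.Dict String (List String)) (p : String × List Int) =>
          if ((p.2.length : Int) == 1) = true then
            d.insert p.1
              [PySem.List.pyGetD dates (PySem.List.pyGetD p.2 0 0) "",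
               PySem.List.pyGetD detals (PySem.List.pyGetD p.2 0 0) "",
               PySem.List.pyGetD notes (PySem.List.pyGetD p.2 0 0) ""]
          else d) PySem.Dict.empty).items
    rw [hA2, hB2, hfilter, List.map_map, hpair2]

theorem getDic_spec : Claim_equal_getDic := by
  intro lst dates detals notes _ _
  unfold Spec_getDic
  exact pv_main lst dates detals notes
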